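-- pv_equiv track=rewrite | github.com/bingi143/Gen_AI | gen_ai_task_2.py | extract_review_info
-- ===== SOURCE A (Python) =====
-- def extract_review_info(review):
--     """
--     Description: Extracts product name and review text from a review.
--
--     Parameters:
--         review (str): The full review text.
--
--     Returns:
--         tuple: A tuple containing the product name and review text.
--     """
--     product = ""
--     review_text = ""
--
--     for line in review.split("\n"):
--         if line.startswith("Product:"):
--             product = line.split(":", 1)[1].strip()
--         elif line.startswith("Review:"):
--             review_text = line.split(":", 1)[1].strip()
--
--     return product, review_text
-- ===== SOURCE B (Python) =====
-- def extract_review_info(review):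
--     """Same extraction, written back-to-front: scan the lines in reverse and
--     take the first (i.e. last-in-text) match for each tag, with slicing
--     instead of split(':', 1)."""
--     lines = review.split("\n")
--
--     def grab(tag):
--         return next((l[len(tag):].strip() for l in reversed(lines)
--                      if l.startswith(tag)), "")
--
--     return grab("Product:"), grab("Review:")
-- ===== Notes on version B (the rewrite author's own statement) =====
-- stated objective: alternative
-- what changed: B replaces A's forward stateful last-wins loop over the lines (two mutable accumulators, a maxsplit-1 colon split per match) with two back-to-front scans that stop at the first matching line and slice off the tag by its length.
import Mathlib
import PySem

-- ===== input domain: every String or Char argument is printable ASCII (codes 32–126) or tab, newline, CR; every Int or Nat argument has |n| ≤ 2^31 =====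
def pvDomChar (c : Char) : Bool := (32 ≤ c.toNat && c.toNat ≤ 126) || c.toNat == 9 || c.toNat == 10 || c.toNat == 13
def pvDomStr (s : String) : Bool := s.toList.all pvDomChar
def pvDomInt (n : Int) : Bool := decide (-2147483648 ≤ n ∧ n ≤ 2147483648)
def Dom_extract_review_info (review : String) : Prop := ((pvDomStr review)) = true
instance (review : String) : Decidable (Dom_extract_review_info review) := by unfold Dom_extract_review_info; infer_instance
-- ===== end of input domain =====

-- B scans the lines back-to-front and stops at the first match for each tag (slicing by the
-- tag's length instead of split(':', 1)); same return value as A's forward last-wins loop.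

-- ===== PORT A =====
-- for line in review.split("\n"): last-wins update of (product, review_text)
def extract_review_info (review : String) : String × String :=
  ((PySem.Str.split? review "\n").getD []).foldl
    (fun st line =>
      if PySem.Str.startswith line "Product:" then
        -- line.split(":", 1)[1].strip(); index 1 exists whenever this branch is taken
        (PySem.Str.strip ((PySem.List.pyGet? ((PySem.Str.splitMax? line ":" 1).getD []) 1).getD ""), st.2)
      else if PySem.Str.startswith line "Review:" then
        (st.1, PySem.Str.strip ((PySem.List.pyGet? ((PySem.Str.splitMax? line ":" 1).getD []) 1).getD ""))
      else st)
    ("", "")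

-- ===== PORT B =====
-- next((l[len(tag):].strip() for l in reversed(lines) if l.startswith(tag)), "")
def pvGrab (lines : List String) (tag : String) : String :=
  match lines.reverse.find? (fun l => PySem.Str.startswith l tag) with
  | some l => PySem.Str.strip (PySem.Str.slice l (some (PySem.Str.len tag)) none)
  | none => ""

def extract_review_info_alt (review : String) : String × String :=
  let lines := (PySem.Str.split? review "\n").getD []
  (pvGrab lines "Product:", pvGrab lines "Review:")

-- ===== PRECONDITION & SPEC =====
def Spec_extract_review_info (review : String) (out : String × String) : Prop := out = extract_review_info_alt review
instance (review : String) (out : String × String) : Decidable (Spec_extract_review_info review out) := by unfold Spec_extract_review_info; infer_instance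

-- ===== CLAIM (what is proved, stated in full; the proofs are below) =====
def Claim_equal_extract_review_info : Prop := ∀ (review : String), Dom_extract_review_info review → Spec_extract_review_info review (extract_review_info review)

-- ===== LEMMAS AND PROOFS =====

-- the value A stores for a matching line
def pvExtr (line : String) : String :=
  PySem.Str.strip ((PySem.List.pyGet? ((PySem.Str.splitMax? line ":" 1).getD []) 1).getD "")

-- one component of A's loop
def pvUpd (tag : String) (acc : String) (line : String) : String :=
  if PySem.Str.startswith line tag then pvExtr line else acc

lemma pvUpd_pos (tag acc line : String) (h : PySem.Str.startswith line tag = true) :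
    pvUpd tag acc line = pvExtr line := by
  unfold pvUpd; rw [h]; simp

lemma pvUpd_neg (tag acc line : String) (h : PySem.Str.startswith line tag = false) :
    pvUpd tag acc line = acc := by
  unfold pvUpd; rw [h]; simp

-- "Product:" and "Review:" are never both prefixes of the same line
lemma pv_excl (l : String) (h : PySem.Str.startswith l "Product:" = true) :
    PySem.Str.startswith l "Review:" = false := by
  rw [PySem.Str.startswith_eq, PySem.Chars.startswith_iff] at h
  by_contra hc
  rw [Bool.not_eq_false, PySem.Str.startswith_eq, PySem.Chars.startswith_iff] at hc
  obtain ⟨r1, h1⟩ := h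
  obtain ⟨r2, h2⟩ := hc
  have h3 : 'P' :: ("roduct:".toList ++ r1) = 'R' :: ("eview:".toList ++ r2) := by
    have e1 : "Product:".toList = 'P' :: "roduct:".toList := rfl
    have e2 : "Review:".toList = 'R' :: "eview:".toList := rfl
    rw [← List.cons_append, ← e1, ← List.cons_append, ← e2, h1, h2]
  simp at h3

-- A's pairwise fold is two independent last-wins folds
lemma pv_fold_pair (lines : List String) (p r : String) :
    lines.foldl
      (fun st line =>
        if PySem.Str.startswith line "Product:" then
          (PySem.Str.strip ((PySem.List.pyGet? ((PySem.Str.splitMax? line ":" 1).getD []) 1).getD ""), st.2)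
        else if PySem.Str.startswith line "Review:" then
          (st.1, PySem.Str.strip ((PySem.List.pyGet? ((PySem.Str.splitMax? line ":" 1).getD []) 1).getD ""))
        else st)
      (p, r)
    = (lines.foldl (pvUpd "Product:") p, lines.foldl (pvUpd "Review:") r) := by
  induction lines generalizing p r with
  | nil => rfl
  | cons l t ih =>
      simp only [List.foldl_cons]
      by_cases hp : PySem.Str.startswith l "Product:" = true
      · rw [hp]
        simp only [if_true]
        rw [ih, pvUpd_pos _ _ _ hp, pvUpd_neg _ _ _ (pv_excl l hp)]
        rfl
      · simp only [Bool.not_eq_true] at hp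
        rw [hp]
        simp only [Bool.false_eq_true, if_false]
        by_cases hr : PySem.Str.startswith l "Review:" = true
        · rw [hr]
          simp only [if_true]
          rw [ih, pvUpd_neg _ _ _ hp, pvUpd_pos _ _ _ hr]
          rfl
        · simp only [Bool.not_eq_true] at hr
          rw [hr]
          simp only [Bool.false_eq_true, if_false]
          rw [ih, pvUpd_neg _ _ _ hp, pvUpd_neg _ _ _ hr]

-- a last-wins fold is the first match of the reversed list
lemma pv_fold_last (lines : List String) (tag : String) (init : String) :
    lines.foldl (pvUpd tag) init
      = match lines.reverse.find? (fun l => PySem.Str.startswith l tag) with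
        | some l => pvExtr l
        | none => init := by
  induction lines generalizing init with
  | nil => rfl
  | cons l t ih =>
      simp only [List.foldl_cons, List.reverse_cons, List.find?_append]
      rw [ih]
      cases hf : t.reverse.find? (fun l => PySem.Str.startswith l tag) with
      | some m => simp
      | none =>
          simp only [Option.none_or]
          by_cases hp : PySem.Str.startswith l tag = true
          · rw [pvUpd_pos _ _ _ hp]
            rw [PySem.Str.startswith_eq] at hp
            simp [hp]
          · simp only [Bool.not_eq_true] at hp
            rw [pvUpd_neg _ _ _ hp]
            rw [PySem.Str.startswith_eq] at hp
            simp [hp]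

-- stepping splitOnMax.go over one non-separator character
lemma pv_go_step (fuel m : Nat) (hm : m ≠ 0) (c : Char) (hc : c ≠ ':') (rest cur : List Char)
    (acc : List (List Char)) :
    PySem.Chars.splitOnMax.go [':'] (fuel + 1) m (c :: rest) cur acc
      = PySem.Chars.splitOnMax.go [':'] fuel m rest (c :: cur) acc := by
  rw [PySem.Chars.splitOnMax.go.eq_def]
  simp [List.isPrefixOf, hm, Ne.symm hc]

-- consuming the tag head (no ':' inside) up to its closing colon
lemma pv_go_skip (p : List Char) (hp : (':' : Char) ∉ p) :
    ∀ (fuel : Nat), p.length < fuel → ∀ (r cur : List Char) (acc : List (List Char)),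
    PySem.Chars.splitOnMax.go [':'] fuel 1 (p ++ ':' :: r) cur acc
      = PySem.Chars.splitOnMax.go [':'] (fuel - (p.length + 1)) 0 r [] ((cur.reverse ++ p) :: acc) := by
  induction p with
  | nil =>
      intro fuel hf r cur acc
      obtain ⟨f, rfl⟩ : ∃ f, fuel = f + 1 := ⟨fuel - 1, by omega⟩
      rw [PySem.Chars.splitOnMax.go.eq_def]
      simp [List.isPrefixOf]
  | cons c p' ih =>
      intro fuel hf r cur acc
      obtain ⟨f, rfl⟩ : ∃ f, fuel = f + 1 := ⟨fuel - 1, by omega⟩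
      have hc : c ≠ ':' := fun h => hp (h ▸ List.mem_cons_self ..)
      have hp' : (':' : Char) ∉ p' := fun h => hp (List.mem_cons_of_mem _ h)
      simp only [List.cons_append]
      rw [pv_go_step f 1 (by omega) c hc _ _ _]
      rw [ih hp' f (by simpa using hf) r (c :: cur) acc]
      simp only [List.reverse_cons, List.append_assoc, List.singleton_append, List.length_cons]
      congr 1
      omega

-- after the split is used up the rest of the string is one piece
lemma pv_go_zero (fuel : Nat) (l cur : List Char) (acc : List (List Char)) :
    PySem.Chars.splitOnMax.go [':'] fuel 0 l cur acc = ((cur.reverse ++ l) :: acc).reverse := by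
  cases fuel with
  | zero => rw [PySem.Chars.splitOnMax.go.eq_def]
  | succ f =>
      cases l with
      | nil => rw [PySem.Chars.splitOnMax.go.eq_def]; simp
      | cons c rest => rw [PySem.Chars.splitOnMax.go.eq_def]; simp

-- l.split(":", 1) on a line of shape p ++ ":" ++ r with no ':' in p
lemma pv_splitOnMax_tag (p r : List Char) (hp : (':' : Char) ∉ p) :
    PySem.Chars.splitOnMax (p ++ ':' :: r) [':'] 1 = [p, r] := by
  rw [PySem.Chars.splitOnMax]
  simp only [show ¬((1 : Int) < 0) by norm_num, if_false, Int.toNat_one]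
  rw [pv_go_skip p hp _ (by simp) r [] []]
  rw [pv_go_zero]
  simp

-- on a matching line, A's split-extract equals B's slice-extract
lemma pv_extr_eq (tagHead : List Char) (hp : (':' : Char) ∉ tagHead) (tag l : String)
    (htag : tag.toList = tagHead ++ [':'])
    (h : PySem.Str.startswith l tag = true) :
    pvExtr l = PySem.Str.strip (PySem.Str.slice l (some (PySem.Str.len tag)) none) := by
  rw [PySem.Str.startswith_eq, PySem.Chars.startswith_iff] at h
  obtain ⟨r, hr⟩ := h
  rw [htag, List.append_assoc, List.singleton_append] at hr
  -- hr : tagHead ++ ':' :: r = l.toList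
  have hsplit : PySem.Str.splitMax? l ":" 1 = some [String.ofList tagHead, String.ofList r] := by
    rw [PySem.Str.splitMax?, PySem.Chars.splitMax?,
      show ":".toList = [':'] from rfl, ← hr, pv_splitOnMax_tag tagHead r hp]
    simp
  have hlen : PySem.Str.len tag = ((tagHead.length + 1 : Nat) : Int) := by
    rw [PySem.Str.len, htag]; simp
  have hdrop : (tagHead ++ ':' :: r).drop (tagHead.length + 1) = r := by
    rw [show tagHead ++ ':' :: r = (tagHead ++ [':']) ++ r by simp]
    simpa using List.drop_left (l₁ := tagHead ++ [':']) (l₂ := r)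
  unfold pvExtr
  rw [hsplit, hlen, PySem.Str.slice, PySem.Chars.slice_eq_listSlice, ← hr,
    PySem.List.slice_from_natCast, hdrop]
  simp [PySem.List.pyGet?, PySem.List.pyIdx?, PySem.Str.strip]

-- ===== VERDICT (by name: the statement is the Claim_ definition above) =====
theorem extract_review_info_spec : Claim_equal_extract_review_info := by
  intro review _
  unfold Spec_extract_review_info
  simp only [extract_review_info, extract_review_info_alt]
  rw [pv_fold_pair]
  simp only [Prod.mk.injEq]
  refine ⟨?_, ?_⟩ <;> rw [pv_fold_last] <;> unfold pvGrab
  · cases hf : ((PySem.Str.split? review "\n").getD []).reverse.find?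
        (fun l => PySem.Str.startswith l "Product:") with
    | none => rfl
    | some l =>
        have hpl : PySem.Str.startswith l "Product:" = true := by
          simpa using List.find?_some hf
        exact pv_extr_eq "Product".toList (by decide) "Product:" l (by decide) hpl
  · cases hf : ((PySem.Str.split? review "\n").getD []).reverse.find?
        (fun l => PySem.Str.startswith l "Review:") with
    | none => rfl
    | some l =>
        have hpl : PySem.Str.startswith l "Review:" = true := by
          simpa using List.find?_some hf
        exact pv_extr_eq "Review".toList (by decide) "Review:" l (by decide) hpl
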